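-- pv_equiv track=rewrite | github.com/ElanShudnow/PythonLearning | codeacademy/Vinegere.py | vinegere_encode
-- ===== SOURCE A (Python) =====
-- import string
-- import string
--
-- alphabet = string.ascii_lowercase
--
-- def vinegere_encode(message, keyword):
--     new_message = ""
--     index = 0
--     for letter in message:
--         if letter in alphabet:
--             character_index_in_alphabet = alphabet.index(letter)
--             if index >= len(keyword):
--                 index = 0
--             keyword_index_in_alphabet = alphabet.index(keyword[index])
--             new_index_in_alphabet = (character_index_in_alphabet - keyword_index_in_alphabet) % 26
--             offset_index_in_alphabet = alphabet[new_index_in_alphabet]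
--             new_message += offset_index_in_alphabet
--
--             index += 1
--         else:
--             new_message += letter
--     return new_message
-- ===== SOURCE B (Python) =====
-- import string
--
-- alphabet = string.ascii_lowercase
--
-- def vinegere_encode(message, keyword):
--     # Two-pass: encode the lowercase letters in one bulk pass, then merge them
--     # back into the message in a second pass.
--     letters = [ch for ch in message if ch in alphabet]
--     encoded = [alphabet[(alphabet.index(ch) - alphabet.index(keyword[j % len(keyword)])) % 26]
--                for j, ch in enumerate(letters)]
--     it = iter(encoded)
--     return "".join(next(it) if ch in alphabet else ch for ch in message)
-- ===== Notes on version B (the rewrite author's own statement) =====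
-- stated objective: alternative
-- what changed: Replaces A's single loop threading a manually-reset key counter through the message with three separate passes: filter out the lowercase letters, bulk-encode them with enumerate and j % len(keyword), then merge the encoded stream back into the message.
import Mathlib
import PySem

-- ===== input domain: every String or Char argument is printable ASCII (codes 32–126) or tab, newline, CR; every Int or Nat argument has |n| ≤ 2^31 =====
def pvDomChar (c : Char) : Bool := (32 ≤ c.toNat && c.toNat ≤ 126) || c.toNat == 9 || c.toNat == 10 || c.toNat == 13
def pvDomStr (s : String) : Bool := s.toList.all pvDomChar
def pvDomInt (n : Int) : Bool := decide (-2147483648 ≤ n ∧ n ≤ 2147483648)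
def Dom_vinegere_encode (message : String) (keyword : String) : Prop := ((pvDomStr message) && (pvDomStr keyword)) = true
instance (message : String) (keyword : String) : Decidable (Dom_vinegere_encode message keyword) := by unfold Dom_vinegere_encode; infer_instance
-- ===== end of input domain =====

-- ===== PORT A =====
-- One honest line: B re-decomposes A's counter-threading loop into filter / bulk-encode / merge passes (alternative decomposition, same cost).
-- `letter in alphabet` / `alphabet.index(letter)` act on single characters, so they are ported as
-- list membership / PySem.List.index? over the alphabet's character list (exact for 1-char strings).
def pvAlph : List Char := "abcdefghijklmnopqrstuvwxyz".toList

-- literal port of A's loop: state = (new_message, index); getD fallbacks are only reached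
-- where Python A raises (excluded by Pre_).
def vinegere_encode (message : String) (keyword : String) : String :=
  let kw := keyword.toList
  let st := message.toList.foldl (fun (st : List Char × Nat) letter =>
    if letter ∈ pvAlph then
      let ci : Int := ((PySem.List.index? pvAlph letter).getD 0 : Nat)
      let index := if st.2 ≥ kw.length then 0 else st.2
      let kch := (PySem.List.pyGet? kw (index : Int)).getD 'a'
      let ki : Int := ((PySem.List.index? pvAlph kch).getD 0 : Nat)
      let nidx := PySem.Int.mod (ci - ki) 26
      let och := (PySem.List.pyGet? pvAlph nidx).getD 'a'
      (st.1 ++ [och], index + 1)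
    else (st.1 ++ [letter], st.2)) ([], 0)
  String.mk st.1

-- ===== PORT B =====
-- shared alphabet constant pvAlph above plays string.ascii_lowercase for both ports
-- port of B's third pass: ''.join(next(it) if ch in alphabet else ch for ch in message)
def pvMerge (ms : List Char) (enc : List Char) : List Char :=
  match ms with
  | [] => []
  | c :: cs =>
    if c ∈ pvAlph then enc.headD 'a' :: pvMerge cs enc.tail   -- next(it): never exhausted by construction
    else c :: pvMerge cs enc

def vinegere_encode_alt (message : String) (keyword : String) : String :=
  let kw := keyword.toList
  let letters := message.toList.filter (· ∈ pvAlph)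
  let encoded := (PySem.List.enumerate letters).map (fun jc =>
    let ci : Int := ((PySem.List.index? pvAlph jc.2).getD 0 : Nat)
    let kch := (PySem.List.pyGet? kw (PySem.Int.mod jc.1 (kw.length : Int))).getD 'a'
    let ki : Int := ((PySem.List.index? pvAlph kch).getD 0 : Nat)
    (PySem.List.pyGet? pvAlph (PySem.Int.mod (ci - ki) 26)).getD 'a')
  String.mk (pvMerge message.toList encoded)

-- ===== PRECONDITION & SPEC =====
-- Pre_ excludes exactly the inputs where Python A raises: an empty keyword while the message
-- contains a lowercase letter (IndexError), or a non-lowercase character among the keyword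
-- positions the cycling counter actually reads (ValueError from alphabet.index).
def Pre_vinegere_encode (message : String) (keyword : String) : Prop :=
  ((message.toList.filter (· ∈ pvAlph)).isEmpty ||
    (!keyword.toList.isEmpty &&
      (keyword.toList.take (message.toList.filter (· ∈ pvAlph)).length).all (· ∈ pvAlph))) = true
instance (message : String) (keyword : String) : Decidable (Pre_vinegere_encode message keyword) := by
  unfold Pre_vinegere_encode; infer_instance

def pvWitness_vinegere_encode : String × String := ("hi u!", "key")

def Spec_vinegere_encode (message : String) (keyword : String) (out : String) : Prop := out = vinegere_encode_alt message keyword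
instance (message : String) (keyword : String) (out : String) : Decidable (Spec_vinegere_encode message keyword out) := by unfold Spec_vinegere_encode; infer_instance

-- ===== CLAIM (what is proved, stated in full; the proofs are below) =====
def Claim_equal_vinegere_encode : Prop := ∀ (message : String) (keyword : String), Dom_vinegere_encode message keyword → Pre_vinegere_encode message keyword → Spec_vinegere_encode message keyword (vinegere_encode message keyword)

-- ===== LEMMAS AND PROOFS =====
-- (the two ports are in fact equal on ALL inputs; Pre_ is only needed for faithfulness to Python A)

-- the common per-letter encoding, with the key counter value j
def pvEnc (kw : List Char) (c : Char) (j : Int) : Char :=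
  let ci : Int := ((PySem.List.index? pvAlph c).getD 0 : Nat)
  let kch := (PySem.List.pyGet? kw (PySem.Int.mod j (kw.length : Int))).getD 'a'
  let ki : Int := ((PySem.List.index? pvAlph kch).getD 0 : Nat)
  (PySem.List.pyGet? pvAlph (PySem.Int.mod (ci - ki) 26)).getD 'a'

-- the common recursive specification both ports reduce to
def pvC (kw : List Char) : List Char → Nat → List Char
  | [], _ => []
  | c :: cs, j =>
    if c ∈ pvAlph then pvEnc kw c (j : Int) :: pvC kw cs (j + 1)
    else c :: pvC kw cs j

-- A's stored counter after j encoded letters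
def pvStored (L j : Nat) : Nat :=
  if j = 0 then 0 else if L = 0 then 1 else (j - 1) % L + 1

theorem pvSuccMod (n L : Nat) (hL : 0 < L) :
    (n + 1) % L = if n % L + 1 = L then 0 else n % L + 1 := by
  have hm : n % L < L := Nat.mod_lt _ hL
  rw [Nat.add_mod]
  rcases Nat.lt_or_ge L 2 with h1 | h1
  · have hone : L = 1 := by omega
    subst hone; simp [Nat.mod_one]
  · rw [Nat.mod_eq_of_lt h1]
    by_cases h : n % L + 1 = L
    · simp [h]
    · simp [Nat.mod_eq_of_lt (show n % L + 1 < L by omega), h]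

theorem pvStored_eff (L j : Nat) :
    (if pvStored L j ≥ L then 0 else pvStored L j) = (if L = 0 then 0 else j % L) := by
  rcases Nat.eq_zero_or_pos L with hL | hL
  · subst hL; unfold pvStored; split_ifs <;> simp_all
  · rcases Nat.eq_zero_or_pos j with hj | hj
    · subst hj; unfold pvStored; simp [Nat.pos_iff_ne_zero.mp hL]
    · obtain ⟨n, rfl⟩ : ∃ n, j = n + 1 := ⟨j - 1, by omega⟩
      unfold pvStored
      rw [pvSuccMod n L hL]
      have hm : n % L < L := Nat.mod_lt _ hL
      simp only [Nat.add_sub_cancel, Nat.add_eq_zero_iff, Nat.pos_iff_ne_zero.mp hL,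
        ite_false, and_false, one_ne_zero]
      split_ifs <;> omega

theorem pvStored_eff_succ (L j : Nat) :
    (if pvStored L j ≥ L then 0 else pvStored L j) + 1 = pvStored L (j + 1) := by
  rw [pvStored_eff]; unfold pvStored
  rcases Nat.eq_zero_or_pos L with hL | hL
  · simp [hL]
  · simp [Nat.pos_iff_ne_zero.mp hL]

-- the key char A reads (reset-counter index) equals the one B reads (j % len);
-- for an empty keyword both lookups are none, so the getD fallbacks also agree
theorem pvKeyGet (kw : List Char) (j : Nat) :
    PySem.List.pyGet? kw (if kw.length ≤ pvStored kw.length j then 0 else (pvStored kw.length j : Int))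
      = PySem.List.pyGet? kw ((j : Int) % (kw.length : Int)) := by
  rcases Nat.eq_zero_or_pos kw.length with hL | hL
  · have hk : kw = [] := List.length_eq_zero_iff.mp hL
    subst hk; simp [PySem.List.pyGet?, PySem.List.pyIdx?]
  · have he := pvStored_eff kw.length j
    rw [if_neg (Nat.pos_iff_ne_zero.mp hL)] at he
    have hcast : (if kw.length ≤ pvStored kw.length j then (0 : Int) else (pvStored kw.length j : Int))
        = ((j % kw.length : Nat) : Int) := by
      split_ifs with h
      · simp only [ge_iff_le, if_pos h] at he; exact_mod_cast congrArg (Nat.cast : Nat → Int) he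
      · simp only [ge_iff_le, if_neg h] at he; exact_mod_cast congrArg (Nat.cast : Nat → Int) he
    rw [hcast]
    congr 1

-- A's foldl computes pvC
theorem pvA_loop (kw : List Char) (cs : List Char) (j : Nat) (acc : List Char) :
    (cs.foldl (fun (st : List Char × Nat) letter =>
      if letter ∈ pvAlph then
        let ci : Int := ((PySem.List.index? pvAlph letter).getD 0 : Nat)
        let index := if st.2 ≥ kw.length then 0 else st.2
        let kch := (PySem.List.pyGet? kw (index : Int)).getD 'a'
        let ki : Int := ((PySem.List.index? pvAlph kch).getD 0 : Nat)
        let nidx := PySem.Int.mod (ci - ki) 26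
        let och := (PySem.List.pyGet? pvAlph nidx).getD 'a'
        (st.1 ++ [och], index + 1)
      else (st.1 ++ [letter], st.2)) (acc, pvStored kw.length j)).1
    = acc ++ pvC kw cs j := by
  induction cs generalizing j acc with
  | nil => simp [pvC]
  | cons c cs ih =>
    by_cases hc : c ∈ pvAlph
    · simp only [List.foldl_cons, hc, if_pos, pvC]
      rw [show ((if pvStored kw.length j ≥ kw.length then 0 else pvStored kw.length j) + 1) = pvStored kw.length (j+1) from pvStored_eff_succ kw.length j]
      rw [ih (j+1)]
      simp [pvEnc, pvKeyGet kw j]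
    · simp only [List.foldl_cons, hc, if_neg, not_false_iff, pvC]
      rw [ih j]
      simp

-- B's merge of the bulk-encoded letters computes pvC (generalized over the enumerate start)
theorem pvB_merge (kw : List Char) (cs : List Char) (j : Nat) :
    pvMerge cs ((PySem.List.enumerate (cs.filter (· ∈ pvAlph)) (j : Int)).map
      (fun jc => pvEnc kw jc.2 jc.1)) = pvC kw cs j := by
  induction cs generalizing j with
  | nil => simp [pvMerge, pvC]
  | cons c cs ih =>
    by_cases hc : c ∈ pvAlph
    · simp only [List.filter_cons, hc, decide_true, ite_true, PySem.List.enumerate_cons,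
        List.map_cons, pvMerge, pvC, List.headD_cons, List.tail_cons]
      have hcast : ((j : Int) + 1) = ((j + 1 : Nat) : Int) := by push_cast; ring
      rw [hcast, ih (j+1)]
    · simp only [List.filter_cons, hc, decide_false, Bool.false_eq_true, if_false, pvMerge,
        pvC, ite_false]
      exact congrArg _ (ih j)

-- ===== VERDICT (by name: the statement is the Claim_ definition above) =====
theorem vinegere_encode_spec : Claim_equal_vinegere_encode := by
  intro message keyword _ _
  unfold Spec_vinegere_encode
  have hA := pvA_loop keyword.toList message.toList 0 []
  rw [show pvStored keyword.toList.length 0 = 0 from by simp [pvStored], List.nil_append] at hA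
  have hB := pvB_merge keyword.toList message.toList 0
  simp only [Nat.cast_zero] at hB
  exact congrArg String.mk (hA.trans hB.symm)
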